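-- pv_equiv track=rewrite | github.com/tinomudashe/job-hacker-bot | backend/app/resume_formatter.py | format_skills
-- ===== SOURCE A (Python) =====
-- from typing import List, Optional
--
-- def format_skills(skills: List[str], max_skills: int = 12) -> List[str]:
--     """
--     Format and prioritize skills list
--
--     Args:
--         skills: List of skills
--         max_skills: Maximum number of skills to include
--
--     Returns:
--         Formatted and prioritized skills list
--     """
--     if not skills:
--         return []
--
--     # Remove duplicates while preserving order
--     seen = set()
--     unique_skills = []
--     for skill in skills:
--         skill_lower = skill.lower().strip()
--         if skill_lower not in seen:
--             seen.add(skill_lower)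
--             unique_skills.append(skill.strip())
--
--     # Prioritize technical skills and certifications
--     priority_keywords = ['python', 'javascript', 'java', 'react', 'aws', 'docker',
--                        'kubernetes', 'sql', 'agile', 'scrum', 'certified', 'professional']
--
--     prioritized = []
--     remaining = []
--
--     for skill in unique_skills:
--         if any(keyword in skill.lower() for keyword in priority_keywords):
--             prioritized.append(skill)
--         else:
--             remaining.append(skill)
--
--     # Combine prioritized and remaining, up to max_skills
--     final_skills = prioritized[:max_skills]
--     if len(final_skills) < max_skills:
--         final_skills.extend(remaining[:max_skills - len(final_skills)])
--
--     return final_skills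
-- ===== SOURCE B (Python) =====
-- def format_skills(skills, max_skills=12):
--     """Dedup via a dict keyed by the normalized skill, then one stable sort on a
--     boolean 'non-priority' key replaces the partition-and-splice; one slice at the end."""
--     priority_keywords = ['python', 'javascript', 'java', 'react', 'aws', 'docker',
--                          'kubernetes', 'sql', 'agile', 'scrum', 'certified', 'professional']
--     first_by_key = {}
--     for skill in skills:
--         first_by_key.setdefault(skill.lower().strip(), skill.strip())
--
--     def non_priority(s):
--         low = s.lower()
--         return not any(kw in low for kw in priority_keywords)
--
--     return sorted(first_by_key.values(), key=non_priority)[:max_skills]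
-- ===== Notes on version B (the rewrite author's own statement) =====
-- stated objective: idiomatic
-- what changed: The seen-set + append-list dedup loop becomes a dict keyed by the normalized skill (setdefault), and the partition-into-two-lists-and-splice becomes a single stable sort on a boolean non-priority key followed by one slice.
-- outside the precondition, e.g. on format_skills(['python', 'go'], -1): A returns [], B returns ['python']
import Mathlib
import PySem

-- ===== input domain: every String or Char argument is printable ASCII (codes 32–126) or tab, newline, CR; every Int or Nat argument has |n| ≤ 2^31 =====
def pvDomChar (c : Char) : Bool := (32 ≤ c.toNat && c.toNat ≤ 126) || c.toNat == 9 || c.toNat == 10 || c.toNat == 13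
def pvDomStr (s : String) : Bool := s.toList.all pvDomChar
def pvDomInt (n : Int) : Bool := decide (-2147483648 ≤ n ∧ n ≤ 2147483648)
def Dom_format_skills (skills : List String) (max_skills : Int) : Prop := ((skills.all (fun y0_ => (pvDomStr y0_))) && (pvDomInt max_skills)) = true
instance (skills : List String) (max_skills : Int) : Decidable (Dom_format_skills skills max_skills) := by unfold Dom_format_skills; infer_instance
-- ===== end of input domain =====

-- B replaces A's partition-and-splice by one stable sort on a boolean key and one slice,
-- and the seen-set dedup by a dict of first occurrences (objective: idiomatic).

-- ===== PORT A =====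
def pvPriorityKeywords : List String :=
  ["python", "javascript", "java", "react", "aws", "docker",
   "kubernetes", "sql", "agile", "scrum", "certified", "professional"]

-- any(keyword in skill.lower() for keyword in priority_keywords)
def pvIsPriority (skill : String) : Bool :=
  pvPriorityKeywords.any (fun kw => PySem.Str.isIn kw (PySem.Str.lower skill))

def format_skills (skills : List String) (max_skills : Int) : List String :=
  if skills = [] then []
  else
    -- seen/unique_skills loop
    let dedup := skills.foldl
      (fun (acc : PySem.Set String × List String) skill =>
        let skill_lower := PySem.Str.strip (PySem.Str.lower skill)
        if PySem.Set.contains acc.1 skill_lower then acc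
        else (PySem.Set.add acc.1 skill_lower, acc.2 ++ [PySem.Str.strip skill]))
      (PySem.Set.empty, [])
    -- prioritized / remaining loop
    let parts := dedup.2.foldl
      (fun (acc : List String × List String) skill =>
        if pvIsPriority skill then (acc.1 ++ [skill], acc.2)
        else (acc.1, acc.2 ++ [skill]))
      ([], [])
    let final := PySem.List.slice parts.1 none (some max_skills)
    if (final.length : Int) < max_skills then
      final ++ PySem.List.slice parts.2 none (some (max_skills - (final.length : Int)))
    else final

-- ===== PORT B =====
def format_skills_alt (skills : List String) (max_skills : Int) : List String :=
  -- first_by_key.setdefault(k, v): exact — keep d unchanged when the key is present, else append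
  let firstByKey : PySem.Dict String String := skills.foldl
    (fun d skill =>
      let k := PySem.Str.strip (PySem.Str.lower skill)
      if PySem.Dict.contains d k then d
      else PySem.Dict.insert d k (PySem.Str.strip skill))
    PySem.Dict.empty
  PySem.List.slice
    (PySem.List.sorted (PySem.Dict.values firstByKey) (fun s => !pvIsPriority s) false)
    none (some max_skills)

-- ===== PRECONDITION & SPEC =====
-- Pre_ excludes negative max_skills: a negative maximum is outside the function's natural
-- domain, and A's value there (the prioritized list with |max_skills| items cut off its end,
-- ignoring remaining) is an artefact of Python's negative-slice arithmetic.
def Pre_format_skills (skills : List String) (max_skills : Int) : Prop := 0 ≤ max_skills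
instance (skills : List String) (max_skills : Int) : Decidable (Pre_format_skills skills max_skills) := by unfold Pre_format_skills; infer_instance

def pvWitness_format_skills : List String × Int := (["Python", " python ", "Go"], 2)

def Spec_format_skills (skills : List String) (max_skills : Int) (out : List String) : Prop := out = format_skills_alt skills max_skills
instance (skills : List String) (max_skills : Int) (out : List String) : Decidable (Spec_format_skills skills max_skills out) := by unfold Spec_format_skills; infer_instance

-- ===== CLAIM (what is proved, stated in full; the proofs are below) =====
def Claim_equal_format_skills : Prop := ∀ (skills : List String) (max_skills : Int), Dom_format_skills skills max_skills → Pre_format_skills skills max_skills → Spec_format_skills skills max_skills (format_skills skills max_skills)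

-- ===== LEMMAS AND PROOFS =====

-- Set-of-keys membership agrees with dict membership
lemma pv_contains_keys (l : List (String × String)) (k : String) :
    PySem.Set.contains (l.map Prod.fst) k = PySem.Dict.contains ⟨l⟩ k := by
  induction l with
  | nil => rfl
  | cons p t ih =>
    simp only [PySem.Set.contains, PySem.Dict.contains, List.map_cons, List.contains_cons,
      List.any_cons] at *
    rw [ih]
    have hc : (k == p.1) = (p.1 == k) := by
      by_cases hkp : k = p.1
      · simp [hkp]
      · simp [hkp, Ne.symm hkp]
    rw [hc]

-- A's dedup state is the (keys, values) view of B's dict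
lemma pv_dedup_eq (skills : List String) (l : List (String × String)) :
    skills.foldl
      (fun (acc : PySem.Set String × List String) skill =>
        let skill_lower := PySem.Str.strip (PySem.Str.lower skill)
        if PySem.Set.contains acc.1 skill_lower then acc
        else (PySem.Set.add acc.1 skill_lower, acc.2 ++ [PySem.Str.strip skill]))
      (l.map Prod.fst, l.map Prod.snd)
    = (let d := skills.foldl
        (fun (d : PySem.Dict String String) skill =>
          let k := PySem.Str.strip (PySem.Str.lower skill)
          if PySem.Dict.contains d k then d
          else PySem.Dict.insert d k (PySem.Str.strip skill)) ⟨l⟩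
       (d.items.map Prod.fst, d.items.map Prod.snd)) := by
  induction skills generalizing l with
  | nil => rfl
  | cons s t ih =>
    simp only [List.foldl_cons]
    by_cases h : PySem.Dict.contains (⟨l⟩ : PySem.Dict String String) (PySem.Str.strip (PySem.Str.lower s)) = true
    · simp only [pv_contains_keys, h, if_pos, if_true]
      exact ih l
    · rw [Bool.not_eq_true] at h
      simp only [pv_contains_keys, h, Bool.false_eq_true, if_false]
      have hins : PySem.Dict.insert (⟨l⟩ : PySem.Dict String String)
          (PySem.Str.strip (PySem.Str.lower s)) (PySem.Str.strip s)
          = ⟨l ++ [(PySem.Str.strip (PySem.Str.lower s), PySem.Str.strip s)]⟩ := by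
        simp only [PySem.Dict.insert, h, Bool.false_eq_true, if_false]
      have hadd : PySem.Set.add (l.map Prod.fst) (PySem.Str.strip (PySem.Str.lower s))
          = l.map Prod.fst ++ [PySem.Str.strip (PySem.Str.lower s)] := by
        simp only [PySem.Set.add, pv_contains_keys, h, Bool.false_eq_true, if_false]
      rw [hins, hadd]
      have := ih (l ++ [(PySem.Str.strip (PySem.Str.lower s), PySem.Str.strip s)])
      simpa using this

-- A's partition loop is two filters
lemma pv_partition_eq (u : List String) (ap ar : List String) :
    u.foldl
      (fun (acc : List String × List String) skill =>
        if pvIsPriority skill then (acc.1 ++ [skill], acc.2)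
        else (acc.1, acc.2 ++ [skill])) (ap, ar)
    = (ap ++ u.filter pvIsPriority, ar ++ u.filter (fun s => !pvIsPriority s)) := by
  induction u generalizing ap ar with
  | nil => simp
  | cons s t ih =>
    by_cases h : pvIsPriority s
    · simp [List.filter_cons, h, ih]
    · simp [List.filter_cons, h, ih]

lemma pv_insertBy_nil {α : Type} (b : α → α → Bool) (x : α) :
    PySem.List.insertBy b x [] = [x] := rfl

lemma pv_insertBy_cons {α : Type} (b : α → α → Bool) (x y : α) (ys : List α) :
    PySem.List.insertBy b x (y :: ys) =
      if b x y then x :: y :: ys else y :: PySem.List.insertBy b x ys := rfl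

-- inserting into a (false-block ++ true-block) list with the boolean-key order
lemma pv_insertBy_partition {α : Type} (key : α → Bool) (x : α) (F T : List α)
    (hF : ∀ a ∈ F, key a = false) (hT : ∀ a ∈ T, key a = true) :
    PySem.List.insertBy (fun a b => decide (key a < key b)) x (F ++ T) =
      if key x then F ++ T ++ [x] else F ++ x :: T := by
  induction F with
  | nil =>
    induction T with
    | nil => cases h : key x <;> simp [pv_insertBy_nil, h]
    | cons y ys ihT =>
      have hy : key y = true := hT y (by simp)
      have hys : ∀ a ∈ ys, key a = true := fun a ha => hT a (by simp [ha])
      have hrec := ihT hys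
      simp only [List.nil_append] at hrec ⊢
      rw [pv_insertBy_cons]
      cases h : key x with
      | false => simp [hy]
      | true =>
        rw [h] at hrec
        simp [hy, hrec]
  | cons z F ihF =>
    have hz : key z = false := hF z (by simp)
    have hF' : ∀ a ∈ F, key a = false := fun a ha => hF a (by simp [ha])
    have hrec := ihF hF'
    simp only [List.cons_append]
    rw [pv_insertBy_cons]
    have hb : decide (key x < key z) = false := by simp [hz, Bool.lt_iff]
    simp only [hb, Bool.false_eq_true, if_false]
    rw [hrec]
    cases h : key x <;> simp [h]

-- stable sort on a boolean key is filter-false ++ filter-true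
lemma pv_sorted_bool (key : String → Bool) (xs : List String) :
    PySem.List.sorted xs key false
      = xs.filter (fun a => !key a) ++ xs.filter key := by
  rw [PySem.List.sorted_eq_foldl_insertBy]
  suffices h : ∀ (ys : List String) (F T : List String),
      (∀ a ∈ F, key a = false) → (∀ a ∈ T, key a = true) →
      ys.foldl (fun acc x => PySem.List.insertBy (fun a b => decide (key a < key b)) x acc) (F ++ T)
        = (F ++ ys.filter (fun a => !key a)) ++ (T ++ ys.filter key) by
    simpa using h xs [] [] (by simp) (by simp)
  intro ys
  induction ys with
  | nil => intro F T _ _; simp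
  | cons x t ih =>
    intro F T hF hT
    rw [List.foldl_cons, pv_insertBy_partition key x F T hF hT]
    cases h : key x with
    | false =>
      have hF' : ∀ a ∈ F ++ [x], key a = false := by
        intro a ha
        rcases List.mem_append.1 ha with ha | ha
        · exact hF a ha
        · simp at ha; subst ha; exact h
      have hrec := ih (F ++ [x]) T hF' hT
      simp only [Bool.false_eq_true, if_false]
      rw [show F ++ x :: T = (F ++ [x]) ++ T by simp, hrec]
      simp [List.filter_cons, h]
    | true =>
      have hT' : ∀ a ∈ T ++ [x], key a = true := by
        intro a ha
        rcases List.mem_append.1 ha with ha | ha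
        · exact hT a ha
        · simp at ha; subst ha; exact h
      have hrec := ih F (T ++ [x]) hF hT'
      simp only [if_true]
      rw [show F ++ T ++ [x] = F ++ (T ++ [x]) by simp, hrec]
      simp [List.filter_cons, h]

-- A's slice-then-extend equals one slice of the concatenation, for 0 ≤ m
lemma pv_splice_eq (p r : List String) (m : Int) (hm : 0 ≤ m) :
    (let final := PySem.List.slice p none (some m)
     if (final.length : Int) < m then
       final ++ PySem.List.slice r none (some (m - (final.length : Int)))
     else final)
    = PySem.List.slice (p ++ r) none (some m) := by
  have h1 := PySem.List.slice_to p hm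
  have h3 := PySem.List.slice_to (p ++ r) hm
  simp only [h1, h3]
  have hlen : (p.take m.toNat).length = min m.toNat p.length := by simp
  by_cases hc : p.length < m.toNat
  · have hfin : (p.take m.toNat) = p := List.take_of_length_le (by omega)
    have hlt : ((p.take m.toNat).length : Int) < m := by
      rw [hfin]; omega
    rw [if_pos hlt, hfin]
    have h2 := PySem.List.slice_to r (b := m - (p.length : Int)) (by omega)
    rw [h2, List.take_append, List.take_of_length_le (l := p) (by omega)]
    congr 1
    congr 1
    omega
  · have hge : ¬ ((p.take m.toNat).length : Int) < m := by
      rw [hlen]; push_cast; omega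
    rw [if_neg hge, List.take_append]
    have : m.toNat - p.length = 0 := by omega
    simp [this]

-- ===== VERDICT (by name: the statement is the Claim_ definition above) =====
theorem format_skills_spec : Claim_equal_format_skills := by
  intro skills m _ hPre
  unfold Spec_format_skills
  unfold Pre_format_skills at hPre
  unfold format_skills format_skills_alt
  by_cases hs : skills = []
  · subst hs
    simp only [if_pos rfl, List.foldl_nil]
    have : PySem.Dict.values (PySem.Dict.empty : PySem.Dict String String) = [] := rfl
    rw [this]
    have hsort : PySem.List.sorted ([] : List String) (fun s => !pvIsPriority s) false = [] := rfl
    rw [hsort, PySem.List.slice_to _ hPre]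
    simp
  · rw [if_neg hs]
    have hded := pv_dedup_eq skills []
    simp only [List.map_nil] at hded
    have hempty : (PySem.Set.empty : PySem.Set String) = ([] : List String) := rfl
    rw [hempty, hded]
    set d := skills.foldl
        (fun (d : PySem.Dict String String) skill =>
          let k := PySem.Str.strip (PySem.Str.lower skill)
          if PySem.Dict.contains d k then d
          else PySem.Dict.insert d k (PySem.Str.strip skill)) ⟨[]⟩ with hd
    have hdempty : (PySem.Dict.empty : PySem.Dict String String) = (⟨[]⟩ : PySem.Dict String String) := rfl
    rw [hdempty, ← hd]
    simp only [PySem.Dict.values, pv_partition_eq, List.nil_append, pv_sorted_bool,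
      Bool.not_not]
    exact pv_splice_eq _ _ m hPre
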